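-- pv_equiv track=rewrite | github.com/marota/Oracle4Grid | oracle4grid/core/graph/graph_generator.py | get_inverted_reachable_topologies
-- ===== SOURCE A (Python) =====
-- def get_inverted_reachable_topologies(ordered_names, reachable_topologies):
--     inverted = []
--     for idx, name in enumerate(ordered_names):
--         inverted.append([])
--         for idxreach, reachable in enumerate(reachable_topologies):
--             if name in reachable:
--                 inverted[idx].append(ordered_names[idxreach])
--     return inverted
-- ===== SOURCE B (Python) =====
-- def get_inverted_reachable_topologies(ordered_names, reachable_topologies):
--     # Single pass: bucket sources by reachable name, then read a bucket per name.
--     buckets = {}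
--     for src, reachable in zip(ordered_names, reachable_topologies):
--         for name in dict.fromkeys(reachable):
--             buckets.setdefault(name, []).append(src)
--     return [buckets.get(name, []) for name in ordered_names]
-- ===== Notes on version B (the rewrite author's own statement) =====
-- stated objective: faster
-- what changed: A scans every reachability list once per name with a linear membership test (O(N*M*L)); B makes a single pass over the zipped (name, reachability-list) pairs, bucketing each source name under its reachable names in a dict, then reads one bucket per name.
import Mathlib
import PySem

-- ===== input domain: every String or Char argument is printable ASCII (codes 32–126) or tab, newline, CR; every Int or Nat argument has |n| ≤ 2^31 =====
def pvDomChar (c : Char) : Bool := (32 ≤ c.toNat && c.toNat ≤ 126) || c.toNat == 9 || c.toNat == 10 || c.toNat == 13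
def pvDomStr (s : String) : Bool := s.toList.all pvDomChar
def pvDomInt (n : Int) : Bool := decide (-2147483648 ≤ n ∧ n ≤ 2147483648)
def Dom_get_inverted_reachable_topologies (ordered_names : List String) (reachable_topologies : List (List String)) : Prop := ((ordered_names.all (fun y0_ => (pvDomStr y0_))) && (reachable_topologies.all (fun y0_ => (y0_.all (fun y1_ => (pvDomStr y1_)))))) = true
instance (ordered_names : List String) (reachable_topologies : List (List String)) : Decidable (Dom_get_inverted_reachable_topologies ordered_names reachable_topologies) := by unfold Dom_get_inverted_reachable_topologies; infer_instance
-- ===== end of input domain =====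

-- B replaces A's per-name scan over all reachability lists by one pass that buckets
-- sources under each reachable name (objective: faster, asymptotic).

-- ===== PORT A =====
-- inner loop of A: for idxreach, reachable in enumerate(reachable_topologies):
--   if name in reachable: inverted[idx].append(ordered_names[idxreach])
-- `ordered_names[idxreach]` raises IndexError out of range; pyGetD's "" default is
-- reached only outside Pre_ (exact on Pre_).
def pvRowA (ordered_names : List String) (reachable_topologies : List (List String)) (name : String) : List String :=
  (PySem.List.enumerate reachable_topologies).foldl
    (fun row p => if p.2.contains name then row ++ [PySem.List.pyGetD ordered_names p.1 ""] else row) []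

def get_inverted_reachable_topologies (ordered_names : List String) (reachable_topologies : List (List String)) : List (List String) :=
  ordered_names.foldl (fun inverted name => inverted ++ [pvRowA ordered_names reachable_topologies name]) []

-- ===== PORT B =====
def get_inverted_reachable_topologies_alt (ordered_names : List String) (reachable_topologies : List (List String)) : List (List String) :=
  let buckets : PySem.Dict String (List String) :=
    (ordered_names.zip reachable_topologies).foldl
      (fun d p => (PySem.List.dedup p.2).foldl
        (fun d name => d.modify name [] (fun xs => xs ++ [p.1])) d)
      PySem.Dict.empty
  ordered_names.map (fun name => buckets.getD name [])

-- ===== PRECONDITION & SPEC =====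
-- Pre_ excludes exactly the inputs where A raises IndexError: a reachability list at an
-- index ≥ len(ordered_names) containing one of the names.
def Pre_get_inverted_reachable_topologies (ordered_names : List String) (reachable_topologies : List (List String)) : Prop :=
  ∀ r ∈ reachable_topologies.drop ordered_names.length, ∀ n ∈ ordered_names, n ∉ r
instance (ordered_names : List String) (reachable_topologies : List (List String)) : Decidable (Pre_get_inverted_reachable_topologies ordered_names reachable_topologies) := by unfold Pre_get_inverted_reachable_topologies; infer_instance
def pvWitness_get_inverted_reachable_topologies : List String × List (List String) := (["a", "b"], [["b"], ["a", "b"]])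

def Spec_get_inverted_reachable_topologies (ordered_names : List String) (reachable_topologies : List (List String)) (out : List (List String)) : Prop := out = get_inverted_reachable_topologies_alt ordered_names reachable_topologies
instance (ordered_names : List String) (reachable_topologies : List (List String)) (out : List (List String)) : Decidable (Spec_get_inverted_reachable_topologies ordered_names reachable_topologies out) := by unfold Spec_get_inverted_reachable_topologies; infer_instance

-- ===== CLAIM (what is proved, stated in full; the proofs are below) =====
def Claim_equal_get_inverted_reachable_topologies : Prop := ∀ (ordered_names : List String) (reachable_topologies : List (List String)), Dom_get_inverted_reachable_topologies ordered_names reachable_topologies → Pre_get_inverted_reachable_topologies ordered_names reachable_topologies → Spec_get_inverted_reachable_topologies ordered_names reachable_topologies (get_inverted_reachable_topologies ordered_names reachable_topologies)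

-- ===== LEMMAS AND PROOFS =====

-- nodup filter by equality: keep exactly the (unique) matching element
lemma pvFilterBeqNodup (name : String) : ∀ (l : List String), l.Nodup →
    l.filter (fun n => n == name) = if name ∈ l then [name] else [] := by
  intro l hl
  induction l with
  | nil => simp
  | cons x t ih =>
    simp only [List.nodup_cons] at hl
    by_cases hx : x = name
    · subst hx
      rw [List.filter_cons_of_pos (by simp), ih hl.2]
      simp [hl.1]
    · rw [List.filter_cons_of_neg (by simp [hx]), ih hl.2]
      simp [Ne.symm hx]

-- B's bucket for a name is the zip-filtered source list
lemma pvBRow (ordered_names : List String) (reachable_topologies : List (List String)) (name : String) :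
    (((ordered_names.zip reachable_topologies).foldl
      (fun d p => (PySem.List.dedup p.2).foldl
        (fun d n => d.modify n [] (fun xs => xs ++ [p.1])) d)
      PySem.Dict.empty).getD name [])
    = (ordered_names.zip reachable_topologies).flatMap
        (fun p => if p.2.contains name then [p.1] else []) := by
  have h1 : (ordered_names.zip reachable_topologies).foldl
      (fun d p => (PySem.List.dedup p.2).foldl
        (fun d n => d.modify n [] (fun xs => xs ++ [p.1])) d)
      PySem.Dict.empty
      = ((ordered_names.zip reachable_topologies).flatMap
          (fun p => (PySem.List.dedup p.2).map (fun n => (n, p.1)))).foldl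
          (fun d q => d.modify q.1 [] (fun xs => xs ++ [q.2])) PySem.Dict.empty := by
    rw [List.foldl_flatMap]
    simp [List.foldl_map]
  rw [h1, PySem.Dict.getD_foldl_modify_append, PySem.Dict.getD_empty, List.nil_append,
    List.filter_flatMap, List.map_flatMap]
  refine List.flatMap_congr ?_
  intro p _
  rw [List.filter_map]
  have : ((fun q : String × String => q.1 == name) ∘ fun n => (n, p.1)) = (fun n => n == name) := rfl
  rw [this, pvFilterBeqNodup name _ (PySem.List.nodup_dedup p.2)]
  by_cases h : name ∈ p.2
  · simp [h]
  · have hc : p.2.contains name = false := by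
      simp [h]
    simp [h, hc]

-- the enumerate-indexed row over a prefix in range equals the zip form
lemma pvEnumZip (name : String) : ∀ (t : List (List String)) (names : List String) (s : Nat),
    s + t.length ≤ names.length →
    ((PySem.List.enumerate t (s : Int)).filter (fun p => p.2.contains name)).map
        (fun p => PySem.List.pyGetD names p.1 "")
    = ((names.drop s).zip t).flatMap (fun p => if p.2.contains name then [p.1] else []) := by
  intro t
  induction t with
  | nil => intro names s _; simp [PySem.List.enumerate]
  | cons r t ih =>
    intro names s hs
    simp only [List.length_cons] at hs
    have hslt : s < names.length := by omega
    have hdrop : names.drop s = names[s] :: names.drop (s + 1) :=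
      List.drop_eq_getElem_cons hslt
    have hih := ih names (s + 1) (by omega)
    rw [PySem.List.enumerate_cons, hdrop]
    have hcast : (s : Int) + 1 = ((s + 1 : Nat) : Int) := by push_cast; ring
    by_cases h : r.contains name
    · simp only [List.filter_cons, h, List.map_cons, List.zip_cons_cons, List.flatMap_cons, h,
        if_true, hcast, hih]
      congr 1
      rw [PySem.List.pyGetD_natCast]
      simp [List.getD_eq_getElem?_getD, hslt]
    · simp only [List.filter_cons, h, List.zip_cons_cons, List.flatMap_cons, if_neg, hcast, hih,
        Bool.false_eq_true, if_false, List.nil_append]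

-- zipping is unchanged by truncating the right list to the left list's length
lemma pvZipTake (names : List String) (reach : List (List String)) :
    names.zip (reach.take names.length) = names.zip reach := by
  induction names generalizing reach with
  | nil => simp
  | cons x t ih =>
    cases reach with
    | nil => simp
    | cons r rs => simp [List.zip_cons_cons, ih]

-- A's row for a listed name equals B's bucket, under Pre_
lemma pvRowEq (ordered_names : List String) (reachable_topologies : List (List String))
    (hpre : Pre_get_inverted_reachable_topologies ordered_names reachable_topologies)
    (name : String) (hmem : name ∈ ordered_names) :
    pvRowA ordered_names reachable_topologies name
    = (ordered_names.zip reachable_topologies).flatMap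
        (fun p => if p.2.contains name then [p.1] else []) := by
  unfold pvRowA
  rw [PySem.List.foldl_append_if (fun p : Int × List String => p.2.contains name)
    (fun p => PySem.List.pyGetD ordered_names p.1 "")]
  rw [List.nil_append]
  have hsplit : reachable_topologies
      = reachable_topologies.take ordered_names.length
        ++ reachable_topologies.drop ordered_names.length := (List.take_append_drop _ _).symm
  conv_lhs => rw [hsplit]
  rw [show (0 : Int) = ((0 : Nat) : Int) by norm_num, PySem.List.enumerate_append,
    List.filter_append, List.map_append]
  have hd : (PySem.List.enumerate (reachable_topologies.drop ordered_names.length)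
      (((0 : Nat) : Int) + (reachable_topologies.take ordered_names.length).length)).filter
      (fun p => p.2.contains name) = [] := by
    rw [List.filter_eq_nil_iff]
    intro p hp
    obtain ⟨k, hk, rfl⟩ := (PySem.List.mem_enumerate_iff _ _ _).mp hp
    have h2 := hpre _ (List.getElem_mem hk) name hmem
    simpa using h2
  rw [hd, List.map_nil, List.append_nil]
  rw [pvEnumZip name (reachable_topologies.take ordered_names.length) ordered_names 0
    (by simp [List.length_take])]
  rw [List.drop_zero, pvZipTake]

-- ===== VERDICT (by name: the statement is the Claim_ definition above) =====
theorem get_inverted_reachable_topologies_spec : Claim_equal_get_inverted_reachable_topologies := by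
  intro ordered_names reachable_topologies _ hpre
  unfold Spec_get_inverted_reachable_topologies
  unfold get_inverted_reachable_topologies get_inverted_reachable_topologies_alt
  rw [PySem.List.foldl_append_singleton_eq_map
    (fun name => pvRowA ordered_names reachable_topologies name) ordered_names []]
  simp only [List.nil_append]
  refine List.map_congr_left ?_
  intro name hmem
  rw [pvRowEq ordered_names reachable_topologies hpre name hmem, pvBRow]
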